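-- pv_equiv track=rewrite | github.com/dkatina/Data-Structures-and-Algos | time_complexity.py | double_split
-- ===== SOURCE A (Python) =====
-- def double_split(alist): #Stacked for loops/ linear operations have a negligible effect on time complexity
--
--     evens =[]
--     odds = []
--
--     for num in alist:
--         if num%2 == 0:
--             evens.append(num*2)
--
--     for num in alist:
--         if num%2 == 1:
--             odds.append(num*2)
--
--     return (evens, odds)
-- ===== SOURCE B (Python) =====
-- def double_split(alist):
--     evens = []
--     odds = []
--     for num in alist:
--         (evens if num % 2 == 0 else odds).append(num * 2)
--     return (evens, odds)
-- ===== Notes on version B (the rewrite author's own statement) =====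
-- stated objective: simpler
-- what changed: Replaces A's two sequential scans over the list with a single pass that maintains both result lists at once, selecting the target list by parity (one traversal instead of two).
import Mathlib
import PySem

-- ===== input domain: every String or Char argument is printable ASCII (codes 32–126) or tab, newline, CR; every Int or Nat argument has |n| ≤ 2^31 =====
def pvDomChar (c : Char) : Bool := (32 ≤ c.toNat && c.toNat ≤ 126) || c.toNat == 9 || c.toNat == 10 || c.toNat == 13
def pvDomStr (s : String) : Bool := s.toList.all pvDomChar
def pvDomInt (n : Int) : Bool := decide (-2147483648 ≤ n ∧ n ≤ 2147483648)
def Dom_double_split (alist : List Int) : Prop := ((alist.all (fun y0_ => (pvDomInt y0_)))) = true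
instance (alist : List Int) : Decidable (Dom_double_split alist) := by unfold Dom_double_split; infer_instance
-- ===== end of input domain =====

-- ===== PORT A =====
-- A: two sequential scans, each appending num*2 on its parity test
def double_split (alist : List Int) : List Int × List Int :=
  let evens := alist.foldl (fun acc num => if PySem.Int.mod num 2 = 0 then acc ++ [num * 2] else acc) []
  let odds := alist.foldl (fun acc num => if PySem.Int.mod num 2 = 1 then acc ++ [num * 2] else acc) []
  (evens, odds)

-- ===== PORT B =====
-- B (one honest line): one pass maintaining both lists; simpler single loop, same output
def double_split_alt (alist : List Int) : List Int × List Int :=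
  alist.foldl (fun p num =>
    if PySem.Int.mod num 2 = 0 then (p.1 ++ [num * 2], p.2) else (p.1, p.2 ++ [num * 2]))
    ([], [])

-- ===== PRECONDITION & SPEC =====
def Spec_double_split (alist : List Int) (out : List Int × List Int) : Prop := out = double_split_alt alist
instance (alist : List Int) (out : List Int × List Int) : Decidable (Spec_double_split alist out) := by unfold Spec_double_split; infer_instance

-- ===== CLAIM (what is proved, stated in full; the proofs are below) =====
def Claim_equal_double_split : Prop := ∀ (alist : List Int), Dom_double_split alist → Spec_double_split alist (double_split alist)

-- ===== LEMMAS AND PROOFS =====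

-- ===== VERDICT (by name: the statement is the Claim_ definition above) =====
theorem pv_fold_pair (l : List Int) (e o : List Int) :
    l.foldl (fun p num =>
      if PySem.Int.mod num 2 = 0 then (p.1 ++ [num * 2], p.2) else (p.1, p.2 ++ [num * 2])) (e, o)
    = (l.foldl (fun acc num => if PySem.Int.mod num 2 = 0 then acc ++ [num * 2] else acc) e,
       l.foldl (fun acc num => if PySem.Int.mod num 2 = 1 then acc ++ [num * 2] else acc) o) := by
  induction l generalizing e o with
  | nil => rfl
  | cons n t ih =>
    rcases PySem.Int.mod_two_eq n with h | h
    · have h1 : ¬ (PySem.Int.mod n 2 = 1) := by rw [h]; norm_num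
      rw [List.foldl_cons, List.foldl_cons, List.foldl_cons,
        if_pos h, if_pos h, if_neg h1, ih]
    · have h0 : ¬ (PySem.Int.mod n 2 = 0) := by rw [h]; norm_num
      rw [List.foldl_cons, List.foldl_cons, List.foldl_cons,
        if_neg h0, if_neg h0, if_pos h, ih]

theorem double_split_spec : Claim_equal_double_split := by
  intro alist _
  unfold Spec_double_split double_split double_split_alt
  rw [pv_fold_pair]
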